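-- pv_equiv track=rewrite | github.com/movinow/pz-mod-update-checker | pz_mod_update_checker.py | _tokenize_vdf
-- ===== SOURCE A (Python) =====
-- def _tokenize_vdf(text: str):
--     """VDFテキストをトークンに分割する。"""
--     i = 0
--     length = len(text)
--     while i < length:
--         c = text[i]
--         if c in (" ", "\t", "\r", "\n"):
--             i += 1
--         elif c == '"':
--             j = i + 1
--             while j < length and text[j] != '"':
--                 if text[j] == "\\":
--                     j += 1
--                 j += 1
--             yield text[i + 1 : j]
--             i = j + 1
--         elif c == "{":
--             yield "{"
--             i += 1
--         elif c == "}":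
--             yield "}"
--             i += 1
--         elif c == "/" and i + 1 < length and text[i + 1] == "/":
--             while i < length and text[i] != "\n":
--                 i += 1
--         else:
--             j = i
--             while j < length and text[j] not in (" ", "\t", "\r", "\n", '"', "{", "}"):
--                 j += 1
--             yield text[i:j]
--             i = j
-- ===== SOURCE B (Python) =====
-- def _tokenize_vdf(text: str):
--     """One-pass character state machine (idle/bare/string/comment/slash) instead of index-jumping nested scans."""
--     IDLE, BARE, STR, COMMENT, SLASH = range(5)
--     state = IDLE
--     buf = []
--     esc = False
--
--     for c in text:
--         if state == COMMENT:
--             if c == "\n":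
--                 state = IDLE
--         elif state == STR:
--             if esc:
--                 buf.append(c)
--                 esc = False
--             elif c == "\\":
--                 buf.append(c)
--                 esc = True
--             elif c == '"':
--                 yield "".join(buf)
--                 buf = []
--                 state = IDLE
--             else:
--                 buf.append(c)
--         elif state == SLASH:
--             if c == "/":
--                 state = COMMENT
--             elif c in ' \t\r\n"{}':
--                 yield "/"
--                 state = IDLE
--                 if c == '"':
--                     state = STR
--                 elif c == "{":
--                     yield "{"
--                 elif c == "}":
--                     yield "}"
--             else:
--                 buf = ["/", c]
--                 state = BARE
--         elif state == BARE:
--             if c in ' \t\r\n"{}':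
--                 yield "".join(buf)
--                 buf = []
--                 state = IDLE
--                 if c == '"':
--                     state = STR
--                 elif c == "{":
--                     yield "{"
--                 elif c == "}":
--                     yield "}"
--             else:
--                 buf.append(c)
--         else:  # IDLE
--             if c in " \t\r\n":
--                 pass
--             elif c == '"':
--                 state = STR
--             elif c == "{":
--                 yield "{"
--             elif c == "}":
--                 yield "}"
--             elif c == "/":
--                 state = SLASH
--             else:
--                 buf = [c]
--                 state = BARE
--
--     if state in (STR, BARE):
--         yield "".join(buf)
--     elif state == SLASH:
--         yield "/"
-- ===== Notes on version B (the rewrite author's own statement) =====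
-- stated objective: alternative
-- what changed: Replaced A's index-jumping outer loop with nested inner scan loops (quoted string, comment, bare token) by a single forward pass over the characters driven by an explicit five-state machine (idle/bare/string/comment/slash) with a token buffer and an escape flag.
import Mathlib
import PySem

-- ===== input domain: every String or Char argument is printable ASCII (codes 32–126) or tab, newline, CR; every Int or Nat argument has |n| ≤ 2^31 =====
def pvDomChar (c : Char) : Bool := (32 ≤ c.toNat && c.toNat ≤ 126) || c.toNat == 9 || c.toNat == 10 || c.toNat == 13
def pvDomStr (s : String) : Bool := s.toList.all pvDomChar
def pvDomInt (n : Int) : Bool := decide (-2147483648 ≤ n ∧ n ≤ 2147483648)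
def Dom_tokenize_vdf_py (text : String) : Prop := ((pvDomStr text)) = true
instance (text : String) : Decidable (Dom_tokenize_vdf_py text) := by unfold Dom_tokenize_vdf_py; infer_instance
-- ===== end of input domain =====

-- B replaces A's index-jumping nested scans by a single-pass character state machine (alternative decomposition, same cost).

-- ===== PORT A =====
-- A's inner quoted-string scan: returns (raw content, rest after the closing quote).
def pvTokStr : List Char → List Char × List Char
  | [] => ([], [])
  | '"' :: r => ([], r)
  | '\\' :: [] => (['\\'], [])
  | '\\' :: c :: r => ('\\' :: c :: (pvTokStr r).1, (pvTokStr r).2)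
  | c :: r => (c :: (pvTokStr r).1, (pvTokStr r).2)

theorem pvTokStr_len (l : List Char) : (pvTokStr l).2.length ≤ l.length := by
  fun_induction pvTokStr l <;> simp_all <;> omega

-- A's bare-token stopper set (space, tab, CR, LF, quote, braces).
def pvIsStop (c : Char) : Bool :=
  c == ' ' || c == '\t' || c == '\r' || c == '\n' || c == '"' || c == '{' || c == '}'

def pvTokAux : List Char → List String
  | [] => []
  | c :: r =>
    if c == ' ' || c == '\t' || c == '\r' || c == '\n' then pvTokAux r
    else if c == '"' then
      String.mk (pvTokStr r).1 :: pvTokAux (pvTokStr r).2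
    else if c == '{' then "{" :: pvTokAux r
    else if c == '}' then "}" :: pvTokAux r
    else if c == '/' && r.head? == some '/' then
      pvTokAux (r.dropWhile (fun x => x != '\n'))
    else
      String.mk (c :: r.takeWhile (fun x => !pvIsStop x)) :: pvTokAux (r.dropWhile (fun x => !pvIsStop x))
termination_by l => l.length
decreasing_by all_goals
  first
  | (have := pvTokStr_len r; simp; omega)
  | (have := List.length_dropWhile_le (fun x => x != '\n') r; simp; omega)
  | (have := List.length_dropWhile_le (fun x => !pvIsStop x) r; simp; omega)
  | (simp; omega)
  | simp

def tokenize_vdf_py (text : String) : List String := pvTokAux text.toList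

-- ===== PORT B =====
inductive BState
  | idle | bare (buf : List Char) | strS (buf : List Char) (esc : Bool) | comment | slash
deriving Repr, DecidableEq

-- one step of Source B's loop body: next state and the tokens yielded at this character
def pvStepB : BState → Char → BState × List String
  | .comment, c => if c == '\n' then (.idle, []) else (.comment, [])
  | .strS buf true, c => (.strS (buf ++ [c]) false, [])
  | .strS buf false, c =>
      if c == '\\' then (.strS (buf ++ [c]) true, [])
      else if c == '"' then (.idle, [String.mk buf])
      else (.strS (buf ++ [c]) false, [])
  | .slash, c =>
      if c == '/' then (.comment, [])
      else if pvIsStop c then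
        if c == '"' then (.strS [] false, ["/"])
        else if c == '{' then (.idle, ["/", "{"])
        else if c == '}' then (.idle, ["/", "}"])
        else (.idle, ["/"])
      else (.bare ['/', c], [])
  | .bare buf, c =>
      if pvIsStop c then
        if c == '"' then (.strS [] false, [String.mk buf])
        else if c == '{' then (.idle, [String.mk buf, "{"])
        else if c == '}' then (.idle, [String.mk buf, "}"])
        else (.idle, [String.mk buf])
      else (.bare (buf ++ [c]), [])
  | .idle, c =>
      if c == ' ' || c == '\t' || c == '\r' || c == '\n' then (.idle, [])
      else if c == '"' then (.strS [] false, [])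
      else if c == '{' then (.idle, ["{"])
      else if c == '}' then (.idle, ["}"])
      else if c == '/' then (.slash, [])
      else (.bare [c], [])

-- Source B's trailing yields after the loop
def pvFinishB : BState → List String
  | .idle => [] | .comment => [] | .slash => ["/"]
  | .bare buf => [String.mk buf] | .strS buf _ => [String.mk buf]

def tokenize_vdf_py_alt (text : String) : List String :=
  let p := text.toList.foldl (fun acc c => let s := pvStepB acc.1 c; (s.1, acc.2 ++ s.2))
            (BState.idle, [])
  p.2 ++ pvFinishB p.1

-- ===== PRECONDITION & SPEC =====
def Spec_tokenize_vdf_py (text : String) (out : List String) : Prop := out = tokenize_vdf_py_alt text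
instance (text : String) (out : List String) : Decidable (Spec_tokenize_vdf_py text out) := by unfold Spec_tokenize_vdf_py; infer_instance

-- ===== CLAIM (what is proved, stated in full; the proofs are below) =====
def Claim_equal_tokenize_vdf_py : Prop := ∀ (text : String), Dom_tokenize_vdf_py text → Spec_tokenize_vdf_py text (tokenize_vdf_py text)

-- ===== LEMMAS AND PROOFS =====

-- recursion form of B's fold, for the proofs
def pvRunB : BState → List Char → List String
  | s, [] => pvFinishB s
  | s, c :: r => (pvStepB s c).2 ++ pvRunB (pvStepB s c).1 r

theorem pvFold_run (l : List Char) (s : BState) (out : List String) :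
    (l.foldl (fun acc c => let s := pvStepB acc.1 c; (s.1, acc.2 ++ s.2)) (s, out)).2 ++
      pvFinishB (l.foldl (fun acc c => let s := pvStepB acc.1 c; (s.1, acc.2 ++ s.2)) (s, out)).1
      = out ++ pvRunB s l := by
  induction l generalizing s out with
  | nil => simp [pvRunB]
  | cons c r ih => simp only [List.foldl_cons]; rw [ih]; simp [pvRunB]

theorem pvStrL (l : List Char) : ∀ buf : List Char,
    pvRunB (.strS buf false) l = String.mk (buf ++ (pvTokStr l).1) :: pvRunB .idle (pvTokStr l).2 := by
  fun_induction pvTokStr l with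
  | case1 => intro buf; simp [pvRunB, pvTokStr, pvFinishB]
  | case2 r => intro buf; simp [pvRunB, pvStepB, pvTokStr]
  | case3 => intro buf; simp [pvRunB, pvStepB, pvTokStr, pvFinishB]
  | case4 c r ih => intro buf; simp [pvRunB, pvStepB, pvTokStr, ih]
  | case5 c r h1 h2 h3 ih =>
    intro buf
    have hb : c ≠ '\\' := by
      intro hcc
      cases r with
      | nil => exact h2 hcc rfl
      | cons a t => exact h3 a t hcc rfl
    have h1' : c ≠ '"' := fun hcc => h1 hcc
    simp only [pvRunB, pvStepB]
    simp [pvTokStr, hb, h1', ih]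

theorem pvBareL (l : List Char) : ∀ buf : List Char,
    pvRunB (.bare buf) l =
      String.mk (buf ++ l.takeWhile (fun x => !pvIsStop x)) ::
        pvRunB .idle (l.dropWhile (fun x => !pvIsStop x)) := by
  induction l with
  | nil => intro buf; simp [pvRunB, pvFinishB]
  | cons c r ih =>
    intro buf
    by_cases hs : pvIsStop c = true
    · have hcase := hs
      simp only [pvIsStop, Bool.or_eq_true, beq_iff_eq] at hcase
      obtain ((((((h|h)|h)|h)|h)|h)|h) := hcase <;> subst h <;>
        simp [pvRunB, pvStepB, pvIsStop]
    · simp [pvRunB, pvStepB, hs, List.takeWhile_cons, List.dropWhile_cons, ih]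

theorem pvCommentL (l : List Char) :
    pvRunB .comment l = pvRunB .idle (l.dropWhile (fun x => x != '\n')) := by
  induction l with
  | nil => simp [pvRunB, pvFinishB]
  | cons c r ih =>
    by_cases h : c = '\n'
    · subst h; simp [pvRunB, pvStepB]
    · simp [pvRunB, pvStepB, h, List.dropWhile_cons, ih]

theorem pvSlashL (l : List Char) (hl : l.head? ≠ some '/') :
    pvRunB .slash l =
      String.mk ('/' :: l.takeWhile (fun x => !pvIsStop x)) ::
        pvRunB .idle (l.dropWhile (fun x => !pvIsStop x)) := by
  cases l with
  | nil => simp [pvRunB, pvFinishB]; decide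
  | cons c r =>
    have hc : c ≠ '/' := by simpa using hl
    by_cases hs : pvIsStop c = true
    · have hcase := hs
      simp only [pvIsStop, Bool.or_eq_true, beq_iff_eq] at hcase
      obtain ((((((h|h)|h)|h)|h)|h)|h) := hcase <;> subst h <;>
        simp [pvRunB, pvStepB, pvIsStop] <;> decide
    · simp [pvRunB, pvStepB, hc, hs, List.takeWhile_cons, List.dropWhile_cons, pvBareL]

theorem pvMain : ∀ n (l : List Char), l.length ≤ n → pvTokAux l = pvRunB .idle l := by
  intro n
  induction n with
  | zero =>
    intro l h
    have : l = [] := List.eq_nil_of_length_eq_zero (Nat.le_zero.mp h)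
    subst this; simp [pvTokAux, pvRunB, pvFinishB]
  | succ n ih =>
    intro l h
    cases l with
    | nil => simp [pvTokAux, pvRunB, pvFinishB]
    | cons c r =>
      have hr : r.length ≤ n := by simpa using h
      by_cases hws : (c == ' ' || c == '\t' || c == '\r' || c == '\n') = true
      · have hcase := hws
        simp only [Bool.or_eq_true, beq_iff_eq] at hcase
        obtain (((h'|h')|h')|h') := hcase <;> subst h' <;>
          simp [pvTokAux, pvRunB, pvStepB, ih r hr]
      · by_cases hq : c = '"'
        · subst hq
          have hlen : (pvTokStr r).2.length ≤ n := le_trans (pvTokStr_len r) hr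
          simp [pvTokAux, pvRunB, pvStepB, pvStrL, ih _ hlen]
        · by_cases hob : c = '{'
          · subst hob; simp [pvTokAux, pvRunB, pvStepB, ih r hr]
          · by_cases hcb : c = '}'
            · subst hcb; simp [pvTokAux, pvRunB, pvStepB, ih r hr]
            · by_cases hcm : c = '/' ∧ r.head? = some '/'
              · obtain ⟨hc, hh⟩ := hcm
                subst hc
                obtain ⟨r', hr'⟩ : ∃ r', r = '/' :: r' := by
                  cases r with
                  | nil => simp at hh
                  | cons a t => simp at hh; exact ⟨t, by rw [hh]⟩
                subst hr'
                have hlen : (r'.dropWhile (fun x => x != '\n')).length ≤ n := by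
                  have := List.length_dropWhile_le (fun x => x != '\n') r'
                  simp at h ⊢; omega
                simp [pvTokAux, pvRunB, pvStepB, pvCommentL, List.dropWhile_cons, ih _ hlen]
              · -- bare-token branch
                have h1 : c ≠ ' ' := fun h' => hws (by simp [h'])
                have h2 : c ≠ '\t' := fun h' => hws (by simp [h'])
                have h3 : c ≠ '\r' := fun h' => hws (by simp [h'])
                have h4 : c ≠ '\n' := fun h' => hws (by simp [h'])
                have hstop : pvIsStop c = false := by
                  simp [pvIsStop, h1, h2, h3, h4, hq, hob, hcb]
                have hnot : (c == '/' && r.head? == some '/') = false := by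
                  by_cases hsl : c = '/'
                  · subst hsl
                    simp only [Bool.and_eq_false_iff]
                    right
                    simpa using fun hh => hcm ⟨rfl, by simpa using hh⟩
                  · simp [hsl]
                have hlen : (r.dropWhile (fun x => !pvIsStop x)).length ≤ n :=
                  le_trans (List.length_dropWhile_le _ r) hr
                by_cases hsl : c = '/'
                · subst hsl
                  have hh : r.head? ≠ some '/' := fun hh => hcm ⟨rfl, hh⟩
                  have hh' : (r.head? == some '/') = false := by simpa using hh
                  simp [pvTokAux, pvRunB, pvStepB, hnot, hh', pvSlashL r hh, ih _ hlen]
                · simp [pvTokAux, pvRunB, pvStepB, hws, hq, hob, hcb, hnot, hsl, hstop,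
                        pvBareL, ih _ hlen]

-- ===== VERDICT (by name: the statement is the Claim_ definition above) =====
theorem tokenize_vdf_py_spec : Claim_equal_tokenize_vdf_py := by
  intro text _
  unfold Spec_tokenize_vdf_py tokenize_vdf_py tokenize_vdf_py_alt
  rw [pvMain text.toList.length text.toList le_rfl]
  exact (pvFold_run text.toList .idle []).symm
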